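-- pv_equiv track=rewrite | github.com/graphcore-research/flash-attention | tests/cute/benchmark_hsa.py | _flop_matched_sliding_window_tokens
-- ===== SOURCE A (Python) =====
-- def _causal_sliding_window_pairs(seqlen: int, window_tokens: int) -> int:
--     w = max(1, min(int(window_tokens), int(seqlen)))
--     return w * seqlen - (w * (w - 1)) // 2
--
-- def _flop_matched_sliding_window_tokens(seqlen: int, allowed_pairs: int) -> int:
--     if seqlen <= 1:
--         return 1
--     causal_pairs = seqlen * (seqlen + 1) // 2
--     target_pairs = max(1, min(int(allowed_pairs), int(causal_pairs)))
--     low = 1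
--     high = seqlen
--     while low < high:
--         mid = (low + high) // 2
--         if _causal_sliding_window_pairs(seqlen, mid) < target_pairs:
--             low = mid + 1
--         else:
--             high = mid
--     best = low
--     if best > 1:
--         prev = best - 1
--         if abs(_causal_sliding_window_pairs(seqlen, prev) - target_pairs) <= abs(
--             _causal_sliding_window_pairs(seqlen, best) - target_pairs
--         ):
--             best = prev
--     return best
-- ===== SOURCE B (Python) =====
-- import math
--
-- def _causal_sliding_window_pairs(seqlen: int, window_tokens: int) -> int:
--     w = max(1, min(int(window_tokens), int(seqlen)))
--     return w * seqlen - (w * (w - 1)) // 2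
--
-- def _flop_matched_sliding_window_tokens(seqlen: int, allowed_pairs: int) -> int:
--     if seqlen <= 1:
--         return 1
--     causal_pairs = seqlen * (seqlen + 1) // 2
--     target_pairs = max(1, min(int(allowed_pairs), int(causal_pairs)))
--     # closed-form inversion: smallest w with w*seqlen - w*(w-1)//2 >= target_pairs
--     disc = (2 * seqlen + 1) ** 2 - 8 * target_pairs
--     w = ((2 * seqlen + 1) - math.isqrt(disc)) // 2
--     w = max(1, min(w, seqlen))
--     # local correction (O(1) steps in practice) to the exact smallest such w
--     while w > 1 and _causal_sliding_window_pairs(seqlen, w - 1) >= target_pairs: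
--         w -= 1
--     while _causal_sliding_window_pairs(seqlen, w) < target_pairs:
--         w += 1
--     best = w
--     if best > 1:
--         prev = best - 1
--         if abs(_causal_sliding_window_pairs(seqlen, prev) - target_pairs) <= abs(
--             _causal_sliding_window_pairs(seqlen, best) - target_pairs
--         ):
--             best = prev
--     return best
-- ===== Notes on version B (the rewrite author's own statement) =====
-- stated objective: alternative
-- what changed: Replaces A's binary search over window sizes by a closed-form quadratic inversion via math.isqrt with O(1) local correction to the exact smallest window, keeping the same prev-vs-best epilogue.
import Mathlib
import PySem

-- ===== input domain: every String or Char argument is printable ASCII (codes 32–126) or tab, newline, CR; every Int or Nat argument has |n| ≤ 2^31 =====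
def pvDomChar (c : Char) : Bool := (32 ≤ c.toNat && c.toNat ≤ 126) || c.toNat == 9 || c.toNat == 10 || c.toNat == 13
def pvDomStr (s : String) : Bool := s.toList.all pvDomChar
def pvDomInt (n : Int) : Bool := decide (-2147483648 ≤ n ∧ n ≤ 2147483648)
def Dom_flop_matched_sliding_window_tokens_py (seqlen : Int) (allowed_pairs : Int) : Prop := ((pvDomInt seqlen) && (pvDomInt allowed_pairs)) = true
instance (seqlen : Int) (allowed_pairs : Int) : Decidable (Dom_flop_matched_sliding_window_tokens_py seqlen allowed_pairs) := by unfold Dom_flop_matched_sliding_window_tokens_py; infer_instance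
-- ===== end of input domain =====

-- B replaces A's binary search by a closed-form isqrt inversion with O(1) local correction (alternative algorithm; same epilogue).

-- ===== PORT A =====
-- helper _causal_sliding_window_pairs (shared source-level helper, ported once)
def cswPairs (seqlen window : Int) : Int :=
  let w := max 1 (min window seqlen)
  w * seqlen - PySem.Int.floordiv (w * (w - 1)) 2

-- midpoint bounds, needed for the binary search's termination
theorem pvMidBounds {low high : Int} (h : low < high) :
    low ≤ PySem.Int.floordiv (low + high) 2 ∧ PySem.Int.floordiv (low + high) 2 < high := by
  constructor
  · exact (PySem.Int.floordiv_two_mid_bounds (le_of_lt h)).1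
  · rw [PySem.Int.floordiv_lt_iff_lt_mul (by omega : (0:Int) < 2)]; omega

-- A's while-loop (binary search), step for step
def pvBSearch (seqlen target low high : Int) : Int :=
  if h : low < high then
    let mid := PySem.Int.floordiv (low + high) 2
    if cswPairs seqlen mid < target then pvBSearch seqlen target (mid + 1) high
    else pvBSearch seqlen target low mid
  else low
termination_by (high - low).toNat
decreasing_by
  · have := pvMidBounds h; omega
  · have := pvMidBounds h; omega

def flop_matched_sliding_window_tokens_py (seqlen : Int) (allowed_pairs : Int) : Int :=
  if seqlen ≤ 1 then 1
  else
    let causal_pairs := PySem.Int.floordiv (seqlen * (seqlen + 1)) 2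
    let target_pairs := max 1 (min allowed_pairs causal_pairs)
    let best := pvBSearch seqlen target_pairs 1 seqlen
    if 1 < best then
      if |cswPairs seqlen (best - 1) - target_pairs| ≤ |cswPairs seqlen best - target_pairs| then
        best - 1
      else best
    else best

-- ===== PORT B =====
-- B's first while-loop (step down while the previous window still meets the target); fuel = seqlen bounds it
def pvDown (seqlen target w : Int) : Nat → Int
  | 0 => w
  | fuel + 1 =>
    if 1 < w ∧ target ≤ cswPairs seqlen (w - 1) then pvDown seqlen target (w - 1) fuel
    else w

-- B's second while-loop (step up while below the target); fuel = seqlen bounds it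
def pvUp (seqlen target w : Int) : Nat → Int
  | 0 => w
  | fuel + 1 =>
    if cswPairs seqlen w < target then pvUp seqlen target (w + 1) fuel
    else w

def flop_matched_sliding_window_tokens_py_alt (seqlen : Int) (allowed_pairs : Int) : Int :=
  if seqlen ≤ 1 then 1
  else
    let causal_pairs := PySem.Int.floordiv (seqlen * (seqlen + 1)) 2
    let target_pairs := max 1 (min allowed_pairs causal_pairs)
    let disc := (2 * seqlen + 1) ^ 2 - 8 * target_pairs
    let w0 := PySem.Int.floordiv ((2 * seqlen + 1) - (Nat.sqrt disc.toNat : Int)) 2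
    let w1 := max 1 (min w0 seqlen)
    let w2 := pvDown seqlen target_pairs w1 seqlen.toNat
    let w := pvUp seqlen target_pairs w2 seqlen.toNat
    if 1 < w then
      if |cswPairs seqlen (w - 1) - target_pairs| ≤ |cswPairs seqlen w - target_pairs| then
        w - 1
      else w
    else w

-- ===== PRECONDITION & SPEC =====
def Spec_flop_matched_sliding_window_tokens_py (seqlen : Int) (allowed_pairs : Int) (out : Int) : Prop := out = flop_matched_sliding_window_tokens_py_alt seqlen allowed_pairs
instance (seqlen : Int) (allowed_pairs : Int) (out : Int) : Decidable (Spec_flop_matched_sliding_window_tokens_py seqlen allowed_pairs out) := by unfold Spec_flop_matched_sliding_window_tokens_py; infer_instance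

-- ===== CLAIM (what is proved, stated in full; the proofs are below) =====
def Claim_equal_flop_matched_sliding_window_tokens_py : Prop := ∀ (seqlen : Int) (allowed_pairs : Int), Dom_flop_matched_sliding_window_tokens_py seqlen allowed_pairs → Spec_flop_matched_sliding_window_tokens_py seqlen allowed_pairs (flop_matched_sliding_window_tokens_py seqlen allowed_pairs)

-- ===== LEMMAS AND PROOFS =====

-- exact value of the helper on the clamped range
theorem two_mul_cswPairs {s w : Int} (h1 : 1 ≤ w) (h2 : w ≤ s) :
    2 * cswPairs s w = 2 * w * s - w * (w - 1) := by
  have hclamp : max 1 (min w s) = w := by omega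
  obtain ⟨m, hm⟩ : Even (w * (w - 1)) := by
    have := Int.even_mul_succ_self (w - 1)
    simpa [mul_comm, sub_add_cancel] using this
  have hfd : PySem.Int.floordiv (w * (w - 1)) 2 = m := by
    rw [PySem.Int.floordiv_eq_iff_of_pos (by omega : (0:Int) < 2)]; omega
  simp only [cswPairs]
  rw [hclamp, hfd]; linarith [hm]

theorem csw_mono {s a b : Int} (h1 : 1 ≤ a) (h2 : a ≤ b) (h3 : b ≤ s) :
    cswPairs s a ≤ cswPairs s b := by
  have ha := two_mul_cswPairs h1 (le_trans h2 h3)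
  have hb := two_mul_cswPairs (le_trans h1 h2) h3
  nlinarith [mul_nonneg (sub_nonneg.mpr h2) (by nlinarith : (0:Int) ≤ 2 * s - (a + b - 1))]

-- the least-window characterisation both programs compute
def pvLeastW (s t r : Int) : Prop :=
  1 ≤ r ∧ r ≤ s ∧ t ≤ cswPairs s r ∧ (r = 1 ∨ cswPairs s (r - 1) < t)

theorem pvLeastW_unique {s t r1 r2 : Int} (h1 : pvLeastW s t r1) (h2 : pvLeastW s t r2) : r1 = r2 := by
  obtain ⟨a1, b1, c1, d1⟩ := h1
  obtain ⟨a2, b2, c2, d2⟩ := h2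
  by_contra hne
  rcases lt_or_gt_of_ne hne with hlt | hlt
  · rcases d2 with h | h
    · omega
    · have := csw_mono a1 (by omega : r1 ≤ r2 - 1) (by omega) (s := s); omega
  · rcases d1 with h | h
    · omega
    · have := csw_mono a2 (by omega : r2 ≤ r1 - 1) (by omega) (s := s); omega

theorem pvBSearch_least (s t : Int) : ∀ n low high, (high - low).toNat = n → 1 ≤ low →
    low ≤ high → high ≤ s → t ≤ cswPairs s high → (low = 1 ∨ cswPairs s (low - 1) < t) →
    pvLeastW s t (pvBSearch s t low high) := by
  intro n
  induction n using Nat.strong_induction_on with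
  | _ n ih =>
    intro low high hn h1 h2 h3 h4 h5
    rw [pvBSearch]
    by_cases hlt : low < high
    · have hmid := pvMidBounds hlt
      simp only [dif_pos hlt]
      by_cases hc : cswPairs s (PySem.Int.floordiv (low + high) 2) < t
      · simp only [if_pos hc]
        exact ih _ (by omega) _ _ rfl (by omega) (by omega) h3 h4 (Or.inr (by simpa using hc))
      · simp only [if_neg hc]
        exact ih _ (by omega) _ _ rfl h1 (by omega) (by omega) (by omega) h5
    · simp only [dif_neg hlt]
      refine ⟨h1, by omega, ?_, h5⟩
      have he : low = high := by omega
      rw [he]; exact h4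

theorem pvDown_spec (s t : Int) : ∀ fuel (w : Int), 1 ≤ w → (w - 1).toNat ≤ fuel →
    1 ≤ pvDown s t w fuel ∧ pvDown s t w fuel ≤ w ∧
      (pvDown s t w fuel = 1 ∨ cswPairs s (pvDown s t w fuel - 1) < t) := by
  intro fuel
  induction fuel with
  | zero =>
    intro w h1 h2
    have hw : w = 1 := by omega
    subst hw
    simp [pvDown]
  | succ f ih =>
    intro w h1 h2
    rw [pvDown]
    by_cases hc : 1 < w ∧ t ≤ cswPairs s (w - 1)
    · simp only [if_pos hc]
      have := ih (w - 1) (by omega) (by omega)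
      exact ⟨this.1, by omega, this.2.2⟩
    · simp only [if_neg hc]
      refine ⟨h1, le_refl _, ?_⟩
      by_cases h : w = 1
      · exact Or.inl h
      · refine Or.inr ?_
        by_contra hnot
        exact hc ⟨by omega, by omega⟩

theorem pvUp_spec (s t : Int) (htop : t ≤ cswPairs s s) : ∀ fuel (w : Int), w ≤ s →
    (s - w).toNat ≤ fuel →
    w ≤ pvUp s t w fuel ∧ pvUp s t w fuel ≤ s ∧ t ≤ cswPairs s (pvUp s t w fuel) ∧
      ∀ v, w ≤ v → v < pvUp s t w fuel → cswPairs s v < t := by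
  intro fuel
  induction fuel with
  | zero =>
    intro w h1 h2
    have hw : w = s := by omega
    subst hw
    simp only [pvUp]
    exact ⟨le_refl _, le_refl _, htop, fun v hv1 hv2 => absurd hv2 (by omega)⟩
  | succ f ih =>
    intro w h1 h2
    rw [pvUp]
    by_cases hc : cswPairs s w < t
    · simp only [if_pos hc]
      have hws : w < s := by
        rcases lt_or_eq_of_le h1 with h | h
        · exact h
        · exfalso; rw [h] at hc; omega
      have := ih (w + 1) (by omega) (by omega)
      refine ⟨by omega, this.2.1, this.2.2.1, ?_⟩
      intro v hv1 hv2
      by_cases hvw : v = w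
      · simpa [hvw] using hc
      · exact this.2.2.2 v (by omega) hv2
    · simp only [if_neg hc]
      exact ⟨le_refl _, h1, by omega, fun v hv1 hv2 => absurd hv2 (by omega)⟩

-- ===== VERDICT (by name: the statement is the Claim_ definition above) =====
theorem flop_matched_sliding_window_tokens_py_spec : Claim_equal_flop_matched_sliding_window_tokens_py := by
  intro s ap _dom
  unfold Spec_flop_matched_sliding_window_tokens_py
  unfold flop_matched_sliding_window_tokens_py flop_matched_sliding_window_tokens_py_alt
  by_cases hle : s ≤ 1
  · simp [hle]
  · simp only [if_neg hle]
    have hs2 : 2 ≤ s := by omega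
    set causal := PySem.Int.floordiv (s * (s + 1)) 2 with hcausal
    set t := max 1 (min ap causal) with ht
    -- causal = cswPairs s s, hence the target is reachable at w = s
    have h2c : 2 * causal = s * (s + 1) := by
      obtain ⟨m, hm⟩ := Int.even_mul_succ_self s
      have : PySem.Int.floordiv (s * (s + 1)) 2 = m := by
        rw [PySem.Int.floordiv_eq_iff_of_pos (by omega : (0:Int) < 2)]; omega
      rw [hcausal, this]; omega
    have htop : t ≤ cswPairs s s := by
      have := two_mul_cswPairs (le_trans one_le_two hs2) (le_refl s)
      have hc1 : 1 ≤ causal := by nlinarith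
      have : 2 * cswPairs s s = 2 * causal := by nlinarith
      omega
    -- A's binary search computes the least window
    have hA := pvBSearch_least s t _ 1 s rfl (le_refl 1) (by omega) (le_refl s) htop (Or.inl rfl)
    -- B's local correction computes the least window too
    set w1 := max 1 (min (PySem.Int.floordiv ((2 * s + 1) - (Nat.sqrt ((2 * s + 1) ^ 2 - 8 * t).toNat : Int)) 2) s) with hw1
    have hw1b : 1 ≤ w1 ∧ w1 ≤ s := by omega
    have hD := pvDown_spec s t s.toNat w1 hw1b.1 (by omega)
    set w2 := pvDown s t w1 s.toNat with hw2
    have hU := pvUp_spec s t htop s.toNat w2 (by omega) (by omega)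
    set w := pvUp s t w2 s.toNat with hw
    have hB : pvLeastW s t w := by
      refine ⟨by omega, hU.2.1, hU.2.2.1, ?_⟩
      by_cases hwe : w = w2
      · rcases hD.2.2 with h | h
        · exact Or.inl (by omega)
        · exact Or.inr (by rw [hwe]; exact h)
      · exact Or.inr (hU.2.2.2 (w - 1) (by omega) (by omega))
    have heq : pvBSearch s t 1 s = w := pvLeastW_unique hA hB
    rw [heq]
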